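-- pv_equiv track=rewrite | github.com/PieroPastor/quantum-chess-bot-player | QuantumChess/Pantallas/AI.py | tuplas_con_max_coincidencias
-- ===== SOURCE A (Python) =====
-- def tuplas_con_max_coincidencias(arreglo, nueva_tupla):
--     max_coincidencias = 0
--     mejores_tuplas = []
--
--     for tupla in arreglo:
--         coincidencias = 0
--         for i in range(min(len(tupla), len(nueva_tupla))):  # Comparar solo posiciones válidas
--             if tupla[i] == nueva_tupla[i]:  # Comparación estricta posición por posición
--                 coincidencias += 1
--
--         if coincidencias > max_coincidencias:
--             max_coincidencias = coincidencias
--             mejores_tuplas = [tupla]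
--         elif coincidencias == max_coincidencias:
--             mejores_tuplas.append(tupla)
--
--     return mejores_tuplas, max_coincidencias
-- ===== SOURCE B (Python) =====
-- def tuplas_con_max_coincidencias(arreglo, nueva_tupla):
--     counts = [sum(1 if a == b else 0 for a, b in zip(t, nueva_tupla)) for t in arreglo]
--     m = max(counts, default=0)
--     mejores = [t for t, c in zip(arreglo, counts) if c == m]
--     return mejores, m
-- ===== Notes on version B (the rewrite author's own statement) =====
-- stated objective: simpler
-- what changed: Replaces A's online running-max pass with reset-on-improvement by a build-counts-table, take max with default 0, then filter decomposition; the inner index loop becomes a zip.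
import Mathlib
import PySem

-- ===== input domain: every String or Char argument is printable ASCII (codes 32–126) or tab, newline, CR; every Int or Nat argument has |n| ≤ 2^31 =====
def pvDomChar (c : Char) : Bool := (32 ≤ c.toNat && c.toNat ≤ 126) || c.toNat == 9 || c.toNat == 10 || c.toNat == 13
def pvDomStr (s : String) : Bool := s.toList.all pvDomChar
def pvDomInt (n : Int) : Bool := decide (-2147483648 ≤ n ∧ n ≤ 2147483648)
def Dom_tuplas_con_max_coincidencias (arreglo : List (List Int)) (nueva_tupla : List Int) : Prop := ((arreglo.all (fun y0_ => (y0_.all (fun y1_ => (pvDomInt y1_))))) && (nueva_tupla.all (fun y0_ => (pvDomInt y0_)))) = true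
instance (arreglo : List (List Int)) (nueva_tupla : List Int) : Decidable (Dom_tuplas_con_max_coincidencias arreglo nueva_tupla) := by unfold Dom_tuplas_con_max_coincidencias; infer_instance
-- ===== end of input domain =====

-- B replaces A's online running-max/reset pass by a counts-table + max-with-default-0 + filter decomposition (simpler; same cost).


-- ===== PORT A =====
-- inner loop: for i in range(min(len(tupla), len(nueva_tupla))): if tupla[i] == nueva_tupla[i] — indices always in range, so pyGetD is exact
def pvCntA (nueva_tupla tupla : List Int) : Int :=
  (PySem.List.pyRange 0 ((min tupla.length nueva_tupla.length : Nat) : Int) 1).foldl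
    (fun c i => if PySem.List.pyGetD tupla i 0 = PySem.List.pyGetD nueva_tupla i 0 then c + 1 else c) 0

def tuplas_con_max_coincidencias (arreglo : List (List Int)) (nueva_tupla : List Int) : List (List Int) × Int :=
  arreglo.foldl
    (fun s tupla =>
      let coincidencias := pvCntA nueva_tupla tupla
      if coincidencias > s.2 then ([tupla], coincidencias)
      else if coincidencias = s.2 then (s.1 ++ [tupla], s.2)
      else s)
    ([], 0)

-- ===== PORT B =====
-- sum(1 if a == b else 0 for a, b in zip(t, nueva_tupla))
def pvCntB (nueva_tupla tupla : List Int) : Int :=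
  ((tupla.zip nueva_tupla).map (fun p => if p.1 = p.2 then (1 : Int) else 0)).sum

def tuplas_con_max_coincidencias_alt (arreglo : List (List Int)) (nueva_tupla : List Int) : List (List Int) × Int :=
  let counts := arreglo.map (pvCntB nueva_tupla)
  let m := (PySem.List.max? counts (fun y => y)).getD 0   -- max(counts, default=0)
  let mejores := ((arreglo.zip counts).filter (fun p => p.2 = m)).map Prod.fst
  (mejores, m)

-- ===== PRECONDITION & SPEC =====
def Spec_tuplas_con_max_coincidencias (arreglo : List (List Int)) (nueva_tupla : List Int) (out : List (List Int) × Int) : Prop := out = tuplas_con_max_coincidencias_alt arreglo nueva_tupla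
instance (arreglo : List (List Int)) (nueva_tupla : List Int) (out : List (List Int) × Int) : Decidable (Spec_tuplas_con_max_coincidencias arreglo nueva_tupla out) := by unfold Spec_tuplas_con_max_coincidencias; infer_instance

-- ===== CLAIM (what is proved, stated in full; the proofs are below) =====
def Claim_equal_tuplas_con_max_coincidencias : Prop := ∀ (arreglo : List (List Int)) (nueva_tupla : List Int), Dom_tuplas_con_max_coincidencias arreglo nueva_tupla → Spec_tuplas_con_max_coincidencias arreglo nueva_tupla (tuplas_con_max_coincidencias arreglo nueva_tupla)

-- ===== LEMMAS AND PROOFS =====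

-- a conditional +1 accumulator is the sum of 0/1 indicators
lemma foldl_if_sum {α : Type} (p : α → Prop) [DecidablePred p] (l : List α) (c : Int) :
    l.foldl (fun c x => if p x then c + 1 else c) c
      = c + (l.map (fun x => if p x then (1 : Int) else 0)).sum := by
  induction l generalizing c with
  | nil => simp
  | cons x l ih => simp only [List.foldl_cons, List.map_cons, List.sum_cons, ih]; split <;> ring

lemma range_if_eq_zip (t n : List Int) :
    (List.range (min t.length n.length)).map
        (fun k => if t.getD k 0 = n.getD k 0 then (1 : Int) else 0)
      = (t.zip n).map (fun p => if p.1 = p.2 then (1 : Int) else 0) := by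
  apply List.ext_getElem
  · simp
  · intro k h1 h2
    simp only [List.length_map, List.length_range] at h1
    have hk1 : k < t.length := by omega
    have hk2 : k < n.length := by omega
    simp [List.getElem_zip, List.getD_eq_getElem?_getD, List.getElem?_eq_getElem hk1,
      List.getElem?_eq_getElem hk2]

-- the two match counters agree
lemma cnt_eq (nueva_tupla tupla : List Int) : pvCntA nueva_tupla tupla = pvCntB nueva_tupla tupla := by
  unfold pvCntA pvCntB
  rw [PySem.List.pyRange_zero_nat, List.foldl_map]
  simp only [PySem.List.pyGetD_natCast]
  rw [foldl_if_sum (fun k => tupla.getD k 0 = nueva_tupla.getD k 0), range_if_eq_zip]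
  ring

lemma le_foldl_maxcnt (cnt : List Int → Int) (xs : List (List Int)) (m : Int) :
    m ≤ xs.foldl (fun a t => max a (cnt t)) m := by
  induction xs generalizing m with
  | nil => simp
  | cons x xs ih => exact le_trans (le_max_left _ _) (ih _)

-- characterisation of A's loop: running max with reset = (filter by final max, final max)
lemma loopA_eq (cnt : List Int → Int) (xs : List (List Int)) (acc : List (List Int)) (m : Int) :
    xs.foldl
      (fun s tupla =>
        let c := cnt tupla
        if c > s.2 then ([tupla], c)
        else if c = s.2 then (s.1 ++ [tupla], s.2)
        else s)
      (acc, m)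
    = ((if xs.foldl (fun a t => max a (cnt t)) m > m then [] else acc)
        ++ xs.filter (fun t => cnt t = xs.foldl (fun a t => max a (cnt t)) m),
       xs.foldl (fun a t => max a (cnt t)) m) := by
  induction xs generalizing acc m with
  | nil => simp
  | cons x xs ih =>
    simp only [List.foldl_cons, List.filter_cons]
    by_cases h1 : cnt x > m
    · rw [if_pos h1]
      have hmax : max m (cnt x) = cnt x := max_eq_right h1.le
      simp only [hmax]
      rw [ih]
      have hle : cnt x ≤ xs.foldl (fun a t => max a (cnt t)) (cnt x) := le_foldl_maxcnt cnt xs _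
      have hMm : xs.foldl (fun a t => max a (cnt t)) (cnt x) > m := lt_of_lt_of_le h1 hle
      rw [if_pos hMm]
      by_cases h2 : xs.foldl (fun a t => max a (cnt t)) (cnt x) > cnt x
      · rw [if_pos h2]
        have : ¬ (cnt x = xs.foldl (fun a t => max a (cnt t)) (cnt x)) := by omega
        simp [this]
      · rw [if_neg h2]
        have hEq : cnt x = xs.foldl (fun a t => max a (cnt t)) (cnt x) := le_antisymm hle (by omega)
        simp [← hEq]
    · rw [if_neg h1]
      by_cases h2 : cnt x = m
      · rw [if_pos h2]
        have hmax : max m (cnt x) = m := max_eq_left (by omega)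
        simp only [hmax]
        rw [ih]
        have hle : m ≤ xs.foldl (fun a t => max a (cnt t)) m := le_foldl_maxcnt cnt xs m
        by_cases h3 : xs.foldl (fun a t => max a (cnt t)) m > m
        · rw [if_pos h3, if_pos h3]
          have : ¬ (cnt x = xs.foldl (fun a t => max a (cnt t)) m) := by omega
          simp [this]
        · rw [if_neg h3, if_neg h3]
          have hEq : cnt x = xs.foldl (fun a t => max a (cnt t)) m := by omega
          simp [hEq]
      · rw [if_neg h2]
        have hmax : max m (cnt x) = m := max_eq_left (by omega)
        simp only [hmax]
        rw [ih]
        have hle : m ≤ xs.foldl (fun a t => max a (cnt t)) m := le_foldl_maxcnt cnt xs m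
        have : ¬ (cnt x = xs.foldl (fun a t => max a (cnt t)) m) := by omega
        simp [this]

lemma max_getD_eq_foldl (counts : List Int) (h : ∀ c ∈ counts, 0 ≤ c) :
    ((PySem.List.max? counts (fun y => y)).getD 0) = counts.foldl max 0 := by
  cases counts with
  | nil => simp [PySem.List.max?]
  | cons x t =>
    rw [PySem.List.max?_id_cons]
    have hx : max 0 x = x := max_eq_right (h x (List.mem_cons_self))
    simp [hx]

lemma filter_zip_map (f : List Int → Int) (xs : List (List Int)) (m : Int) :
    ((xs.zip (xs.map f)).filter (fun p => p.2 = m)).map Prod.fst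
      = xs.filter (fun t => f t = m) := by
  induction xs with
  | nil => simp
  | cons x xs ih => simp only [List.zip_cons_cons, List.map_cons, List.filter_cons]; split <;> simp [ih]

lemma cntB_nonneg (nueva_tupla tupla : List Int) : 0 ≤ pvCntB nueva_tupla tupla := by
  unfold pvCntB
  apply List.sum_nonneg
  intro x hx
  rcases List.mem_map.1 hx with ⟨p, _, rfl⟩
  split <;> norm_num

lemma foldl_max_map (f : List Int → Int) (xs : List (List Int)) (m : Int) :
    (xs.map f).foldl max m = xs.foldl (fun a t => max a (f t)) m := by
  induction xs generalizing m with
  | nil => rfl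
  | cons x xs ih => simp [ih]

-- ===== VERDICT (by name: the statement is the Claim_ definition above) =====
theorem tuplas_con_max_coincidencias_spec : Claim_equal_tuplas_con_max_coincidencias := by
  intro arreglo nueva_tupla _
  unfold Spec_tuplas_con_max_coincidencias tuplas_con_max_coincidencias tuplas_con_max_coincidencias_alt
  rw [loopA_eq (pvCntA nueva_tupla) arreglo [] 0]
  simp only [cnt_eq]
  rw [max_getD_eq_foldl _ (by intro c hc; rcases List.mem_map.1 hc with ⟨t, _, rfl⟩; exact cntB_nonneg _ _)]
  rw [foldl_max_map, filter_zip_map]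
  split <;> simp
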